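-- pv_equiv track=rewrite | github.com/ethanwh/tfrrs | tfrrs/tfrrs.py | filter_meet_data
-- ===== SOURCE A (Python) =====
-- def filter_meet_data(meet_data,men,women,individual,team):
--     keep = []
--     if men and women and individual and team:
--         return meet_data
--     if individual:
--         if women:
--             keep += [table for table in meet_data if table[0] == "women" and table[1] == "individual"]
--         if men:
--             keep += [table for table in meet_data if table[0] == "men" and table[1] == "individual"]
--     if team:
--         if women:
--             keep += [table for table in meet_data if table[0] == "women" and table[1] == "team"]
--         if men:
--             keep += [table for table in meet_data if table[0] == "men" and table[1] == "team"]
--     return keep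
-- ===== SOURCE B (Python) =====
-- def filter_meet_data(meet_data, men, women, individual, team):
--     if men and women and individual and team:
--         return meet_data
--     if not ((individual or team) and (women or men)):
--         return []
--     wi, mi, wt, mt = [], [], [], []
--     for table in meet_data:
--         g = table[0]
--         if g == "women" and women:
--             t = table[1]
--             if t == "individual":
--                 wi.append(table)
--             if t == "team":
--                 wt.append(table)
--         elif g == "men" and men:
--             t = table[1]
--             if t == "individual":
--                 mi.append(table)
--             if t == "team":
--                 mt.append(table)
--     out = []
--     if individual:
--         if women:
--             out += wi
--         if men:
--             out += mi
--     if team: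
--         if women:
--             out += wt
--         if men:
--             out += mt
--     return out
-- ===== Notes on version B (the rewrite author's own statement) =====
-- stated objective: alternative
-- what changed: Replaces A's four separate filtering passes over meet_data with a single pass that dispatches each table into one of four accumulator lists keyed by (gender, type), then concatenates the selected accumulators in A's fixed order; the all-flags fast path and the no-selection empty result are kept.
import Mathlib
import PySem

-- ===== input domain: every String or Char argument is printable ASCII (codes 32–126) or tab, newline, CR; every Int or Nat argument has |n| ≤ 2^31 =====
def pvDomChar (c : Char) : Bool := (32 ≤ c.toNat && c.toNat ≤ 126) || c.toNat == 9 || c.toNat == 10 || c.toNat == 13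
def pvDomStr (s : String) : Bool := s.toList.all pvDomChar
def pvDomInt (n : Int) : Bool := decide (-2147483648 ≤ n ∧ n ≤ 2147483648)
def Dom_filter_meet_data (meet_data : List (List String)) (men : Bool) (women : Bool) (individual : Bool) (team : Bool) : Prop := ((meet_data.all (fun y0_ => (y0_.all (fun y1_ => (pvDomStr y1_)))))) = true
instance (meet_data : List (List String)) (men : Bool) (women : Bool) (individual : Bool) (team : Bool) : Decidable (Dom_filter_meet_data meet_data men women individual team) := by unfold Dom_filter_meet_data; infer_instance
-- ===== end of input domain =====

-- B replaces A's four filtering passes over meet_data with one pass into four accumulator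
-- lists (one per (gender, type) category), concatenated in A's fixed order: an alternative
-- single-pass decomposition, not claimed faster.


-- ===== PORT A =====
-- table[0] / table[1] are ported as (pyGet? …).getD ""; the default is only reached where
-- Python raises IndexError, and Pre_filter_meet_data excludes exactly those inputs.
def filter_meet_data (meet_data : List (List String)) (men : Bool) (women : Bool) (individual : Bool) (team : Bool) : List (List String) :=
  if men && women && individual && team then meet_data
  else
    let keep : List (List String) := []
    let keep := if individual then
        let keep := if women then keep ++ meet_data.filter (fun table => ((PySem.List.pyGet? table 0).getD "" == "women") && ((PySem.List.pyGet? table 1).getD "" == "individual")) else keep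
        if men then keep ++ meet_data.filter (fun table => ((PySem.List.pyGet? table 0).getD "" == "men") && ((PySem.List.pyGet? table 1).getD "" == "individual")) else keep
      else keep
    let keep := if team then
        let keep := if women then keep ++ meet_data.filter (fun table => ((PySem.List.pyGet? table 0).getD "" == "women") && ((PySem.List.pyGet? table 1).getD "" == "team")) else keep
        if men then keep ++ meet_data.filter (fun table => ((PySem.List.pyGet? table 0).getD "" == "men") && ((PySem.List.pyGet? table 1).getD "" == "team")) else keep
      else keep
    keep

-- ===== PORT B =====
-- loop body of Source B: dispatch one table into the four accumulators (wi, mi, wt, mt)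
def pvStepB (women men : Bool) (st : List (List String) × List (List String) × List (List String) × List (List String)) (table : List String) : List (List String) × List (List String) × List (List String) × List (List String) :=
  let g := (PySem.List.pyGet? table 0).getD ""
  if g == "women" && women then
    let t := (PySem.List.pyGet? table 1).getD ""
    let st := if t == "individual" then (st.1 ++ [table], st.2.1, st.2.2.1, st.2.2.2) else st
    if t == "team" then (st.1, st.2.1, st.2.2.1 ++ [table], st.2.2.2) else st
  else if g == "men" && men then
    let t := (PySem.List.pyGet? table 1).getD ""
    let st := if t == "individual" then (st.1, st.2.1 ++ [table], st.2.2.1, st.2.2.2) else st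
    if t == "team" then (st.1, st.2.1, st.2.2.1, st.2.2.2 ++ [table]) else st
  else st

def filter_meet_data_alt (meet_data : List (List String)) (men : Bool) (women : Bool) (individual : Bool) (team : Bool) : List (List String) :=
  if men && women && individual && team then meet_data
  else if !((individual || team) && (women || men)) then []
  else
    let st := meet_data.foldl (pvStepB women men) ([], [], [], [])
    let out : List (List String) := []
    let out := if individual then
        let out := if women then out ++ st.1 else out
        if men then out ++ st.2.1 else out
      else out
    let out := if team then
        let out := if women then out ++ st.2.2.1 else out
        if men then out ++ st.2.2.2 else out
      else out
    out

-- ===== PRECONDITION & SPEC =====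
-- Pre_ excludes exactly the inputs where Python A raises IndexError: when a filtering pass
-- runs (not the all-flags fast path, and at least one gender and one type selected), every
-- table must be non-empty, and a table whose first entry names a selected gender must have a
-- second entry.  (B raises on exactly the same inputs.)
def Pre_filter_meet_data (meet_data : List (List String)) (men : Bool) (women : Bool) (individual : Bool) (team : Bool) : Prop :=
  (men = true ∧ women = true ∧ individual = true ∧ team = true) ∨
  ¬((individual = true ∨ team = true) ∧ (women = true ∨ men = true)) ∨
  ∀ t ∈ meet_data, 1 ≤ t.length ∧
    (((women = true ∧ t.headD "" = "women") ∨ (men = true ∧ t.headD "" = "men")) → 2 ≤ t.length)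
instance (meet_data : List (List String)) (men : Bool) (women : Bool) (individual : Bool) (team : Bool) : Decidable (Pre_filter_meet_data meet_data men women individual team) := by unfold Pre_filter_meet_data; infer_instance

def pvWitness_filter_meet_data : List (List String) × Bool × Bool × Bool × Bool :=
  ([["women", "individual", "x"], ["men", "team"], ["women", "team"]], true, true, true, false)

def Spec_filter_meet_data (meet_data : List (List String)) (men : Bool) (women : Bool) (individual : Bool) (team : Bool) (out : List (List String)) : Prop := out = filter_meet_data_alt meet_data men women individual team
instance (meet_data : List (List String)) (men : Bool) (women : Bool) (individual : Bool) (team : Bool) (out : List (List String)) : Decidable (Spec_filter_meet_data meet_data men women individual team out) := by unfold Spec_filter_meet_data; infer_instance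

-- ===== CLAIM (what is proved, stated in full; the proofs are below) =====
def Claim_equal_filter_meet_data : Prop := ∀ (meet_data : List (List String)) (men : Bool) (women : Bool) (individual : Bool) (team : Bool), Dom_filter_meet_data meet_data men women individual team → Pre_filter_meet_data meet_data men women individual team → Spec_filter_meet_data meet_data men women individual team (filter_meet_data meet_data men women individual team)

-- ===== LEMMAS AND PROOFS =====

-- characterisation of B's single pass: each accumulator ends as its start plus the filter of its category
set_option maxHeartbeats 1000000 in
theorem pvFold_spec (women men : Bool) (md : List (List String)) (wi mi wt mt : List (List String)) :
    md.foldl (pvStepB women men) (wi, mi, wt, mt) =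
      (wi ++ md.filter (fun table => women && (((PySem.List.pyGet? table 0).getD "" == "women") && ((PySem.List.pyGet? table 1).getD "" == "individual"))),
       mi ++ md.filter (fun table => men && (((PySem.List.pyGet? table 0).getD "" == "men") && ((PySem.List.pyGet? table 1).getD "" == "individual"))),
       wt ++ md.filter (fun table => women && (((PySem.List.pyGet? table 0).getD "" == "women") && ((PySem.List.pyGet? table 1).getD "" == "team"))),
       mt ++ md.filter (fun table => men && (((PySem.List.pyGet? table 0).getD "" == "men") && ((PySem.List.pyGet? table 1).getD "" == "team")))) := by
  cases women <;> cases men <;>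
  all_goals
    induction md generalizing wi mi wt mt with
    | nil => simp
    | cons h rest ih =>
      simp only [List.foldl_cons, pvStepB]
      split_ifs <;> simp_all [List.filter_cons, ih]

-- ===== VERDICT (by name: the statement is the Claim_ definition above) =====
theorem filter_meet_data_spec : Claim_equal_filter_meet_data := by
  intro meet_data men women individual team _ _
  unfold Spec_filter_meet_data filter_meet_data filter_meet_data_alt
  cases men <;> cases women <;> cases individual <;> cases team <;>
    simp [pvFold_spec]
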